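-- pv_equiv track=rewrite | github.com/kolyasalubov/UA-1101_13-11-23.PythonFundamentals | task3.2.py | manipulate_number
-- ===== SOURCE A (Python) =====
-- def manipulate_number(number):
--
--     product = 1
--     for digit in str(number):
--         product *= int(digit)
--
--     reversed_number = int(str(number)[::-1])
--
--     sorted_digits = sorted(str(number))
--     sorted_number = int(''.join(sorted_digits))
--
--     return product, reversed_number, sorted_number
-- ===== SOURCE B (Python) =====
-- def manipulate_number(number):
--     s = str(number)
--     product = 1
--     counts = [0] * 10
--     for ch in s:
--         d = int(ch)
--         product *= d
--         counts[d] += 1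
--     reversed_number = int(s[::-1])
--     sorted_number = int(''.join(str(d) * counts[d] for d in range(10)))
--     return product, reversed_number, sorted_number
-- ===== Notes on version B (the rewrite author's own statement) =====
-- stated objective: alternative
-- what changed: One combined pass computes the digit product and a per-digit-value bucket count, and the sorted-digit number is rebuilt by counting sort over digits 0..9 instead of calling sorted() on the string.
import Mathlib
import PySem

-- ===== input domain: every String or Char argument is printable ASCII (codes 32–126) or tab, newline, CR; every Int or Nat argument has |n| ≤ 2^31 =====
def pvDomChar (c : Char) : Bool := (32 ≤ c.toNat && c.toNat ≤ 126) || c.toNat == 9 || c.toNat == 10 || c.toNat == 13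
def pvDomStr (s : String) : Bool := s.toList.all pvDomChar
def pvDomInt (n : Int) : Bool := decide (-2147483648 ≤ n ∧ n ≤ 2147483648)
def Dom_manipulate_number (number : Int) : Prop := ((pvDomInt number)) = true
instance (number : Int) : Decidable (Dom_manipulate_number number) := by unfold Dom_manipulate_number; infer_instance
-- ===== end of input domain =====

-- B fuses the digit-product pass with one bucket-count per digit value and rebuilds the sorted-digit number by counting sort instead of sorted() (return values only; neither version mutates anything).

-- ===== PORT A =====
def manipulate_number (number : Int) : Int × Int × Int :=
  let s := PySem.Int.toChars number
  -- product = 1; for digit in str(number): product *= int(digit)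
  let product := s.foldl (fun p c => p * (PySem.Int.ofChars? [c]).getD 0) 1
  -- reversed_number = int(str(number)[::-1])
  let reversed_number := (PySem.Int.ofChars? ((PySem.List.slice? s none none (-1)).getD [])).getD 0
  -- sorted_digits = sorted(str(number)); sorted_number = int(''.join(sorted_digits))
  let sorted_digits := PySem.List.sorted s (fun c => c) false
  let sorted_number := (PySem.Int.ofChars? sorted_digits).getD 0
  (product, reversed_number, sorted_number)

-- ===== PORT B =====
def manipulate_number_alt (number : Int) : Int × Int × Int :=
  let s := PySem.Int.toChars number
  -- one pass over s: product and counts[d] (counts = [0]*10; d = int(ch))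
  let pc := s.foldl
    (fun (st : Int × List Int) c =>
      ((st.1 * (PySem.Int.ofChars? [c]).getD 0),
       (PySem.List.pySetD st.2 ((PySem.Int.ofChars? [c]).getD 0)
          (PySem.List.pyGetD st.2 ((PySem.Int.ofChars? [c]).getD 0) 0 + 1))))
    (1, [0, 0, 0, 0, 0, 0, 0, 0, 0, 0])
  -- reversed_number = int(s[::-1])
  let reversed_number := (PySem.Int.ofChars? ((PySem.List.slice? s none none (-1)).getD [])).getD 0
  -- sorted_number = int(''.join(str(d) * counts[d] for d in range(10)))  (counting sort)
  let sortedChars := (PySem.List.pyRange 0 10 1).foldl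
    (fun acc d => acc ++ (List.replicate (PySem.List.pyGetD pc.2 d 0).toNat (PySem.Int.toChars d)).flatten) []
  let sorted_number := (PySem.Int.ofChars? sortedChars).getD 0
  (pc.1, reversed_number, sorted_number)

-- ===== PRECONDITION & SPEC =====
-- Pre_ excludes negative numbers: there str(number) starts with '-' and int('-') raises ValueError in A (and in B alike).
def Pre_manipulate_number (number : Int) : Prop := 0 ≤ number
instance (number : Int) : Decidable (Pre_manipulate_number number) := by unfold Pre_manipulate_number; infer_instance
def pvWitness_manipulate_number : Int := 371

def Spec_manipulate_number (number : Int) (out : Int × Int × Int) : Prop := out = manipulate_number_alt number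
instance (number : Int) (out : Int × Int × Int) : Decidable (Spec_manipulate_number number out) := by unfold Spec_manipulate_number; infer_instance

-- ===== CLAIM (what is proved, stated in full; the proofs are below) =====
def Claim_equal_manipulate_number : Prop := ∀ (number : Int), Dom_manipulate_number number → Pre_manipulate_number number → Spec_manipulate_number number (manipulate_number number)

-- ===== LEMMAS AND PROOFS =====

def pvDigits : List Char := ['0', '1', '2', '3', '4', '5', '6', '7', '8', '9']

theorem mem_toDigitsCore_digits (fuel : Nat) : ∀ (n : Nat) (ds : List Char), (∀ c ∈ ds, c ∈ pvDigits) →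
    ∀ c ∈ Nat.toDigitsCore 10 fuel n ds, c ∈ pvDigits := by
  induction fuel with
  | zero => intro n ds hds c hc; rw [Nat.toDigitsCore] at hc; exact hds c hc
  | succ fuel ih =>
    intro n ds hds c hc
    have hdig : (n % 10).digitChar ∈ pvDigits := by
      have : n % 10 < 10 := Nat.mod_lt _ (by omega)
      interval_cases h : n % 10 <;> decide
    rw [Nat.toDigitsCore] at hc
    split at hc
    · rcases List.mem_cons.mp hc with h|h
      · exact h ▸ hdig
      · exact hds c h
    · refine ih _ _ ?_ c hc
      intro x hx
      rcases List.mem_cons.mp hx with h|h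
      · exact h ▸ hdig
      · exact hds x h

theorem mem_toChars_digits (number : Int) (h : 0 ≤ number) :
    ∀ c ∈ PySem.Int.toChars number, c ∈ pvDigits := by
  intro c hc
  unfold PySem.Int.toChars at hc
  rw [if_neg (by omega)] at hc
  exact mem_toDigitsCore_digits _ _ _ (by simp) c hc

theorem pv_digit_val (c : Char) (hc : c ∈ pvDigits) :
    (PySem.Int.ofChars? [c]).getD 0 = ((c.toNat - 48 : Nat) : Int) ∧ c.toNat - 48 < 10 := by
  fin_cases hc <;> exact ⟨by decide, by decide⟩

theorem pv_getD_set (cs : List Int) (k d : Nat) (v : Int) (hk : k < cs.length) :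
    (cs.set k v).getD d 0 = if d = k then v else cs.getD d 0 := by
  rcases eq_or_ne d k with h | h
  · subst h; simp [List.getD, hk]
  · simp [List.getD, List.getElem?_set_ne (Ne.symm h), h]

theorem counts_fold (l : List Char) (hl : ∀ c ∈ l, c ∈ pvDigits) :
    ∀ (cs : List Int), cs.length = 10 →
      (l.foldl (fun (b : List Int) c => PySem.List.pySetD b ((PySem.Int.ofChars? [c]).getD 0)
          (PySem.List.pyGetD b ((PySem.Int.ofChars? [c]).getD 0) 0 + 1)) cs).length = 10 ∧
      ∀ k : Nat, k < 10 →
        (l.foldl (fun (b : List Int) c => PySem.List.pySetD b ((PySem.Int.ofChars? [c]).getD 0)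
            (PySem.List.pyGetD b ((PySem.Int.ofChars? [c]).getD 0) 0 + 1)) cs).getD k 0
          = cs.getD k 0 + (l.countP (fun c => c.toNat - 48 == k) : Int) := by
  induction l with
  | nil => intro cs hcs; exact ⟨hcs, by simp⟩
  | cons c t ih =>
    intro cs hcs
    obtain ⟨hv, hlt⟩ := pv_digit_val c (hl c (List.mem_cons_self))
    have hstep : PySem.List.pySetD cs ((PySem.Int.ofChars? [c]).getD 0)
        (PySem.List.pyGetD cs ((PySem.Int.ofChars? [c]).getD 0) 0 + 1)
        = cs.set (c.toNat - 48) (cs.getD (c.toNat - 48) 0 + 1) := by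
      rw [hv]
      simp [PySem.List.pySetD_natCast, PySem.List.pyGetD_natCast]
    have ht := ih (fun x hx => hl x (List.mem_cons_of_mem _ hx))
      (cs.set (c.toNat - 48) (cs.getD (c.toNat - 48) 0 + 1)) (by simp [hcs])
    constructor
    · simpa [List.foldl_cons, hstep] using ht.1
    · intro k hk
      rw [List.foldl_cons, hstep, ht.2 k hk, pv_getD_set cs (c.toNat - 48) k _ (by omega)]
      rcases eq_or_ne k (c.toNat - 48) with h | h
      · subst h; simp; ring
      · have hfalse : (c.toNat - 48 == k) = false := by
          simpa using (by omega : c.toNat - 48 ≠ k)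
        simp [hfalse]
        exact fun h' => absurd h' h

theorem count_blocks (as : List Char) (f : Char → Nat) (ha : as.Nodup) (x : Char) :
    (as.flatMap (fun a => List.replicate (f a) a)).count x = if x ∈ as then f x else 0 := by
  induction as with
  | nil => simp
  | cons a t ih =>
    simp only [List.flatMap_cons, List.count_append, ih ha.of_cons, List.count_replicate]
    rcases eq_or_ne x a with h | h
    · subst h
      simp [if_neg ((List.nodup_cons.mp ha).1)]
    · simp [h, Ne.symm h]

theorem pairwise_blocks (as : List Char) (f : Char → Nat) (ha : as.Pairwise (· ≤ ·)) :
    (as.flatMap (fun a => List.replicate (f a) a)).Pairwise (· ≤ ·) := by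
  induction as with
  | nil => simp
  | cons a t ih =>
    rw [List.flatMap_cons, List.pairwise_append]
    refine ⟨List.pairwise_replicate.mpr (Or.inr le_rfl), ih ha.of_cons, ?_⟩
    intro x hx y hy
    obtain rfl := List.eq_of_mem_replicate hx
    obtain ⟨b, hb, hyb⟩ := List.mem_flatMap.mp hy
    rw [List.eq_of_mem_replicate hyb]
    exact (List.pairwise_cons.mp ha).1 b hb

theorem sorted_eq_blocks (s : List Char) (hs : ∀ c ∈ s, c ∈ pvDigits) :
    PySem.List.sorted s (fun x => x) false = pvDigits.flatMap (fun a => List.replicate (s.count a) a) := by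
  refine PySem.List.sorted_id_eq_of_perm_of_pairwise _ _ ?_ (pairwise_blocks _ _ (by decide))
  rw [List.perm_iff_count]
  intro x
  rw [count_blocks _ _ (by decide)]
  rcases em (x ∈ pvDigits) with h | h
  · simp [h]
  · simp [h, List.count_eq_zero.mpr (fun hx => h (hs x hx))]

theorem countP_digit (s : List Char) (hs : ∀ c ∈ s, c ∈ pvDigits) (k : Nat) (hk : k < 10) :
    s.countP (fun c => c.toNat - 48 == k) = s.count (Char.ofNat (48 + k)) := by
  rw [List.count_eq_countP]
  refine List.countP_congr ?_
  intro c hc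
  have h1 := hs c hc
  fin_cases h1 <;> interval_cases k <;> decide

theorem flatten_replicate_singleton (n : Nat) (c : Char) :
    (List.replicate n [c]).flatten = List.replicate n c := by
  induction n <;> simp [*, List.replicate_succ]

theorem pv_main (number : Int) (hpre : 0 ≤ number) :
    manipulate_number number = manipulate_number_alt number := by
  have hs := mem_toChars_digits number hpre
  unfold manipulate_number manipulate_number_alt
  simp only []
  rw [PySem.List.foldl_prod_mk (fun p c => p * (PySem.Int.ofChars? [c]).getD 0)
      (fun b c => PySem.List.pySetD b ((PySem.Int.ofChars? [c]).getD 0)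
        (PySem.List.pyGetD b ((PySem.Int.ofChars? [c]).getD 0) 0 + 1))
      (PySem.Int.toChars number) 1 ([0, 0, 0, 0, 0, 0, 0, 0, 0, 0])]
  simp only [Prod.mk.injEq, true_and]
  refine congrArg (fun l => (PySem.Int.ofChars? l).getD 0) ?_
  obtain ⟨hlen, hval⟩ := counts_fold (PySem.Int.toChars number) hs ([0, 0, 0, 0, 0, 0, 0, 0, 0, 0]) (by decide)
  have hr : (PySem.List.pyRange 0 10 1) = [0, 1, 2, 3, 4, 5, 6, 7, 8, 9] := by decide
  rw [hr]
  simp only [List.foldl_cons, List.foldl_nil, List.nil_append]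
  have hgen : ∀ k : Nat, k < 10 → (PySem.List.pyGetD (List.foldl (fun (b : List Int) c => PySem.List.pySetD b ((PySem.Int.ofChars? [c]).getD 0) (PySem.List.pyGetD b ((PySem.Int.ofChars? [c]).getD 0) 0 + 1)) [0, 0, 0, 0, 0, 0, 0, 0, 0, 0] (PySem.Int.toChars number)) ((k : Nat) : Int) 0).toNat = List.countP (fun c => c.toNat - 48 == k) (PySem.Int.toChars number) := by
    intro k hk
    rw [PySem.List.pyGetD_natCast, hval k hk]
    have hz : ([0, 0, 0, 0, 0, 0, 0, 0, 0, 0] : List Int).getD k 0 = 0 := by interval_cases k <;> rfl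
    rw [hz, zero_add, Int.toNat_natCast]
  have h0 : (PySem.List.pyGetD (List.foldl (fun (b : List Int) c => PySem.List.pySetD b ((PySem.Int.ofChars? [c]).getD 0) (PySem.List.pyGetD b ((PySem.Int.ofChars? [c]).getD 0) 0 + 1)) [0, 0, 0, 0, 0, 0, 0, 0, 0, 0] (PySem.Int.toChars number)) (0 : Int) 0).toNat = List.count '0' (PySem.Int.toChars number) := by
    have := hgen 0 (by norm_num)
    rw [countP_digit (PySem.Int.toChars number) hs 0 (by norm_num)] at this
    have he : Char.ofNat (48 + 0) = '0' := by decide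
    rw [he] at this
    simpa using this
  have h1 : (PySem.List.pyGetD (List.foldl (fun (b : List Int) c => PySem.List.pySetD b ((PySem.Int.ofChars? [c]).getD 0) (PySem.List.pyGetD b ((PySem.Int.ofChars? [c]).getD 0) 0 + 1)) [0, 0, 0, 0, 0, 0, 0, 0, 0, 0] (PySem.Int.toChars number)) (1 : Int) 0).toNat = List.count '1' (PySem.Int.toChars number) := by
    have := hgen 1 (by norm_num)
    rw [countP_digit (PySem.Int.toChars number) hs 1 (by norm_num)] at this
    have he : Char.ofNat (48 + 1) = '1' := by decide
    rw [he] at this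
    simpa using this
  have h2 : (PySem.List.pyGetD (List.foldl (fun (b : List Int) c => PySem.List.pySetD b ((PySem.Int.ofChars? [c]).getD 0) (PySem.List.pyGetD b ((PySem.Int.ofChars? [c]).getD 0) 0 + 1)) [0, 0, 0, 0, 0, 0, 0, 0, 0, 0] (PySem.Int.toChars number)) (2 : Int) 0).toNat = List.count '2' (PySem.Int.toChars number) := by
    have := hgen 2 (by norm_num)
    rw [countP_digit (PySem.Int.toChars number) hs 2 (by norm_num)] at this
    have he : Char.ofNat (48 + 2) = '2' := by decide
    rw [he] at this
    simpa using this
  have h3 : (PySem.List.pyGetD (List.foldl (fun (b : List Int) c => PySem.List.pySetD b ((PySem.Int.ofChars? [c]).getD 0) (PySem.List.pyGetD b ((PySem.Int.ofChars? [c]).getD 0) 0 + 1)) [0, 0, 0, 0, 0, 0, 0, 0, 0, 0] (PySem.Int.toChars number)) (3 : Int) 0).toNat = List.count '3' (PySem.Int.toChars number) := by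
    have := hgen 3 (by norm_num)
    rw [countP_digit (PySem.Int.toChars number) hs 3 (by norm_num)] at this
    have he : Char.ofNat (48 + 3) = '3' := by decide
    rw [he] at this
    simpa using this
  have h4 : (PySem.List.pyGetD (List.foldl (fun (b : List Int) c => PySem.List.pySetD b ((PySem.Int.ofChars? [c]).getD 0) (PySem.List.pyGetD b ((PySem.Int.ofChars? [c]).getD 0) 0 + 1)) [0, 0, 0, 0, 0, 0, 0, 0, 0, 0] (PySem.Int.toChars number)) (4 : Int) 0).toNat = List.count '4' (PySem.Int.toChars number) := by
    have := hgen 4 (by norm_num)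
    rw [countP_digit (PySem.Int.toChars number) hs 4 (by norm_num)] at this
    have he : Char.ofNat (48 + 4) = '4' := by decide
    rw [he] at this
    simpa using this
  have h5 : (PySem.List.pyGetD (List.foldl (fun (b : List Int) c => PySem.List.pySetD b ((PySem.Int.ofChars? [c]).getD 0) (PySem.List.pyGetD b ((PySem.Int.ofChars? [c]).getD 0) 0 + 1)) [0, 0, 0, 0, 0, 0, 0, 0, 0, 0] (PySem.Int.toChars number)) (5 : Int) 0).toNat = List.count '5' (PySem.Int.toChars number) := by
    have := hgen 5 (by norm_num)
    rw [countP_digit (PySem.Int.toChars number) hs 5 (by norm_num)] at this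
    have he : Char.ofNat (48 + 5) = '5' := by decide
    rw [he] at this
    simpa using this
  have h6 : (PySem.List.pyGetD (List.foldl (fun (b : List Int) c => PySem.List.pySetD b ((PySem.Int.ofChars? [c]).getD 0) (PySem.List.pyGetD b ((PySem.Int.ofChars? [c]).getD 0) 0 + 1)) [0, 0, 0, 0, 0, 0, 0, 0, 0, 0] (PySem.Int.toChars number)) (6 : Int) 0).toNat = List.count '6' (PySem.Int.toChars number) := by
    have := hgen 6 (by norm_num)
    rw [countP_digit (PySem.Int.toChars number) hs 6 (by norm_num)] at this
    have he : Char.ofNat (48 + 6) = '6' := by decide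
    rw [he] at this
    simpa using this
  have h7 : (PySem.List.pyGetD (List.foldl (fun (b : List Int) c => PySem.List.pySetD b ((PySem.Int.ofChars? [c]).getD 0) (PySem.List.pyGetD b ((PySem.Int.ofChars? [c]).getD 0) 0 + 1)) [0, 0, 0, 0, 0, 0, 0, 0, 0, 0] (PySem.Int.toChars number)) (7 : Int) 0).toNat = List.count '7' (PySem.Int.toChars number) := by
    have := hgen 7 (by norm_num)
    rw [countP_digit (PySem.Int.toChars number) hs 7 (by norm_num)] at this
    have he : Char.ofNat (48 + 7) = '7' := by decide
    rw [he] at this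
    simpa using this
  have h8 : (PySem.List.pyGetD (List.foldl (fun (b : List Int) c => PySem.List.pySetD b ((PySem.Int.ofChars? [c]).getD 0) (PySem.List.pyGetD b ((PySem.Int.ofChars? [c]).getD 0) 0 + 1)) [0, 0, 0, 0, 0, 0, 0, 0, 0, 0] (PySem.Int.toChars number)) (8 : Int) 0).toNat = List.count '8' (PySem.Int.toChars number) := by
    have := hgen 8 (by norm_num)
    rw [countP_digit (PySem.Int.toChars number) hs 8 (by norm_num)] at this
    have he : Char.ofNat (48 + 8) = '8' := by decide
    rw [he] at this
    simpa using this
  have h9 : (PySem.List.pyGetD (List.foldl (fun (b : List Int) c => PySem.List.pySetD b ((PySem.Int.ofChars? [c]).getD 0) (PySem.List.pyGetD b ((PySem.Int.ofChars? [c]).getD 0) 0 + 1)) [0, 0, 0, 0, 0, 0, 0, 0, 0, 0] (PySem.Int.toChars number)) (9 : Int) 0).toNat = List.count '9' (PySem.Int.toChars number) := by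
    have := hgen 9 (by norm_num)
    rw [countP_digit (PySem.Int.toChars number) hs 9 (by norm_num)] at this
    have he : Char.ofNat (48 + 9) = '9' := by decide
    rw [he] at this
    simpa using this
  rw [h0, h1, h2, h3, h4, h5, h6, h7, h8, h9]
  have tc0 : PySem.Int.toChars (0 : Int) = ['0'] := by decide
  have tc1 : PySem.Int.toChars (1 : Int) = ['1'] := by decide
  have tc2 : PySem.Int.toChars (2 : Int) = ['2'] := by decide
  have tc3 : PySem.Int.toChars (3 : Int) = ['3'] := by decide
  have tc4 : PySem.Int.toChars (4 : Int) = ['4'] := by decide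
  have tc5 : PySem.Int.toChars (5 : Int) = ['5'] := by decide
  have tc6 : PySem.Int.toChars (6 : Int) = ['6'] := by decide
  have tc7 : PySem.Int.toChars (7 : Int) = ['7'] := by decide
  have tc8 : PySem.Int.toChars (8 : Int) = ['8'] := by decide
  have tc9 : PySem.Int.toChars (9 : Int) = ['9'] := by decide
  rw [tc0, tc1, tc2, tc3, tc4, tc5, tc6, tc7, tc8, tc9]
  simp only [flatten_replicate_singleton]
  rw [sorted_eq_blocks (PySem.Int.toChars number) hs]
  simp [pvDigits, List.flatMap_cons, List.append_assoc]


-- ===== VERDICT (by name: the statement is the Claim_ definition above) =====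
theorem manipulate_number_spec : Claim_equal_manipulate_number := by
  intro number _hdom hpre
  show manipulate_number number = manipulate_number_alt number
  exact pv_main number hpre
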